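-- pv_equiv track=rewrite | github.com/Kawser-nerd/CLCDSA | Source Codes/AtCoder/abc039/C/4891512.py | pianist_takahashi
-- ===== SOURCE A (Python) =====
-- def pianist_takahashi(S: str)->int:
--     scales = [
--         'Do', 'Do#', 'Re', 'Re#', 'Mi',
--         'Fa', 'Fa#', 'So', 'So#', 'La', 'La#', 'Si'
--     ]
--     keyboard = 'WBWBWWBWBWBW'
--
--     for i, scale in enumerate(scales):
--         if (S).startswith(keyboard[i:] + keyboard[:i]):
--             return scale
--     return 'Unknown'
-- ===== SOURCE B (Python) =====
-- def pianist_takahashi(S: str) -> int: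
--     scales = [
--         'Do', 'Do#', 'Re', 'Re#', 'Mi',
--         'Fa', 'Fa#', 'So', 'So#', 'La', 'La#', 'Si'
--     ]
--     idx = ('WBWBWWBWBWBW' * 2).find(S[:12])
--     if len(S) >= 12 and 0 <= idx < 12:
--         return scales[idx]
--     return 'Unknown'
-- ===== Notes on version B (the rewrite author's own statement) =====
-- stated objective: idiomatic
-- what changed: Replaced the rotation-by-rotation startswith loop with a single substring search: idx = ('WBWBWWBWBWBW'*2).find(S[:12]) locates which rotation S starts with in one find call, guarded by len(S) >= 12 and 0 <= idx < 12.
import Mathlib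
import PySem

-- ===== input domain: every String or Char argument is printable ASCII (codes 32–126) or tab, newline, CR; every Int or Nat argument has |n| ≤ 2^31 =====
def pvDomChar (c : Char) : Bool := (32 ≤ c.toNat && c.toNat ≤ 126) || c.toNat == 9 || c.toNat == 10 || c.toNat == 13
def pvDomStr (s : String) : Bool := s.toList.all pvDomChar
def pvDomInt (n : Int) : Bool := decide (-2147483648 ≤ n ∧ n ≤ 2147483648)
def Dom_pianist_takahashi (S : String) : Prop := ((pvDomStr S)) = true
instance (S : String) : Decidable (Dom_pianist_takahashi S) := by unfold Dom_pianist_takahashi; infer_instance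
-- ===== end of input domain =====

-- B replaces A's rotation-by-rotation startswith loop by a single substring search:
-- idx = (keyboard*2).find(S[:12]); each 12-char rotation is the slice of the doubled
-- keyboard starting at its index, so one find replaces the twelve prefix tests (objective: idiomatic).
-- Python strings are ported as their char lists (PySem.Chars/List).

-- ===== PORT A =====
def pvScales : List String := ["Do", "Do#", "Re", "Re#", "Mi", "Fa", "Fa#", "So", "So#", "La", "La#", "Si"]
def pvKeyboard : List Char := "WBWBWWBWBWBW".toList

-- the 'for i, scale in enumerate(scales): if S.startswith(keyboard[i:] + keyboard[:i]): return scale' loop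
def pvALoop (S : List Char) : List (Int × String) → String
  | [] => "Unknown"
  | (i, scale) :: rest =>
    if PySem.Chars.startswith S (PySem.List.slice pvKeyboard (some i) none ++ PySem.List.slice pvKeyboard none (some i))
    then scale else pvALoop S rest

def pianist_takahashi (S : String) : String :=
  pvALoop S.toList (PySem.List.enumerate pvScales)

-- ===== PORT B =====
def pvScalesB : List String := ["Do", "Do#", "Re", "Re#", "Mi", "Fa", "Fa#", "So", "So#", "La", "La#", "Si"]

-- ('WBWBWWBWBWBW' * 2)
def pvDoubledB : List Char := "WBWBWWBWBWBW".toList ++ "WBWBWWBWBWBW".toList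

-- idx = doubled.find(S[:12]); if len(S) >= 12 and 0 <= idx < 12: return scales[idx]; return 'Unknown'
def pianist_takahashi_alt (S : String) : String :=
  let idx := PySem.Chars.find pvDoubledB (PySem.List.slice S.toList none (some 12))
  if 12 ≤ PySem.Str.len S ∧ 0 ≤ idx ∧ idx < 12 then PySem.List.pyGetD pvScalesB idx "" else "Unknown"

-- ===== PRECONDITION & SPEC =====
def Spec_pianist_takahashi (S : String) (out : String) : Prop := out = pianist_takahashi_alt S
instance (S : String) (out : String) : Decidable (Spec_pianist_takahashi S out) := by unfold Spec_pianist_takahashi; infer_instance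

-- ===== CLAIM =====
def Claim_equal_pianist_takahashi : Prop := ∀ (S : String), Dom_pianist_takahashi S → Spec_pianist_takahashi S (pianist_takahashi S)

-- ===== LEMMAS AND PROOFS =====

-- a 12-char pattern is a prefix of t exactly when t.take 12 equals it
theorem pv_startswith_take (t r : List Char) (hr : r.length = 12) :
    PySem.Chars.startswith t r = decide (t.take 12 = r) := by
  by_cases h : t.take 12 = r
  · simp [← h, PySem.Chars.startswith_iff, List.take_prefix]
  · rw [Bool.eq_iff_iff, PySem.Chars.startswith_iff, List.prefix_iff_eq_take, hr]
    simp [h]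
    intro h2
    exact h h2.symm

theorem pv_pre_take (t l : List Char) (h : t.length = 12) : t <+: l ↔ t = l.take 12 := by
  rw [List.prefix_iff_eq_take, h]

theorem pv_ne_of_len {t r : List Char} (h : t.length < 12) (hr : r.length = 12) : t ≠ r := by
  intro he; rw [he, hr] at h; omega

theorem pv_find_eq_of (l P : List Char) (i : Nat) (h1 : P <+: l.drop i)
    (h2 : ∀ j, j < i → ¬ P <+: l.drop j) : PySem.Chars.find l P = i := by
  have hinf : 0 ≤ PySem.Chars.find l P := by
    rw [PySem.Chars.find_nonneg_iff, ← PySem.Chars.isIn_iff_infix,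
      ← PySem.Chars.exists_prefix_drop_iff_isIn]
    exact ⟨i, h1⟩
  obtain ⟨hs1, hs2⟩ := PySem.Chars.find_spec hinf
  have ht : (PySem.Chars.find l P).toNat = i := by
    rcases lt_trichotomy ((PySem.Chars.find l P).toNat) i with h | h | h
    · exact absurd hs1 (h2 _ h)
    · exact h
    · exact absurd h1 (hs2 i h)
  rw [← Int.toNat_of_nonneg hinf, ht]

set_option maxHeartbeats 2000000 in
theorem pv_find_char (P : List Char) (hP : P.length = 12) :
    PySem.Chars.find pvDoubledB P =
      (if P = "WBWBWWBWBWBW".toList then 0 else if P = "BWBWWBWBWBWW".toList then 1 else if P = "WBWWBWBWBWWB".toList then 2 else if P = "BWWBWBWBWWBW".toList then 3 else if P = "WWBWBWBWWBWB".toList then 4 else if P = "WBWBWBWWBWBW".toList then 5 else if P = "BWBWBWWBWBWW".toList then 6 else if P = "WBWBWWBWBWWB".toList then 7 else if P = "BWBWWBWBWWBW".toList then 8 else if P = "WBWWBWBWWBWB".toList then 9 else if P = "BWWBWBWWBWBW".toList then 10 else if P = "WWBWBWWBWBWB".toList then 11 else -1 : Int) := by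
  by_cases c0 : P = "WBWBWWBWBWBW".toList
  · rw [if_pos c0]
    refine pv_find_eq_of _ _ 0 (by rw [c0]; decide) ?_
    intro j hj; omega
  by_cases c1 : P = "BWBWWBWBWBWW".toList
  · rw [if_neg c0, if_pos c1]
    refine pv_find_eq_of _ _ 1 (by rw [c1]; decide) ?_
    intro j hj hpre
    rw [pv_pre_take P _ hP] at hpre
    interval_cases j
    · exact c0 (hpre.trans (by decide))
  by_cases c2 : P = "WBWWBWBWBWWB".toList
  · rw [if_neg c0, if_neg c1, if_pos c2]
    refine pv_find_eq_of _ _ 2 (by rw [c2]; decide) ?_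
    intro j hj hpre
    rw [pv_pre_take P _ hP] at hpre
    interval_cases j
    · exact c0 (hpre.trans (by decide))
    · exact c1 (hpre.trans (by decide))
  by_cases c3 : P = "BWWBWBWBWWBW".toList
  · rw [if_neg c0, if_neg c1, if_neg c2, if_pos c3]
    refine pv_find_eq_of _ _ 3 (by rw [c3]; decide) ?_
    intro j hj hpre
    rw [pv_pre_take P _ hP] at hpre
    interval_cases j
    · exact c0 (hpre.trans (by decide))
    · exact c1 (hpre.trans (by decide))
    · exact c2 (hpre.trans (by decide))
  by_cases c4 : P = "WWBWBWBWWBWB".toList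
  · rw [if_neg c0, if_neg c1, if_neg c2, if_neg c3, if_pos c4]
    refine pv_find_eq_of _ _ 4 (by rw [c4]; decide) ?_
    intro j hj hpre
    rw [pv_pre_take P _ hP] at hpre
    interval_cases j
    · exact c0 (hpre.trans (by decide))
    · exact c1 (hpre.trans (by decide))
    · exact c2 (hpre.trans (by decide))
    · exact c3 (hpre.trans (by decide))
  by_cases c5 : P = "WBWBWBWWBWBW".toList
  · rw [if_neg c0, if_neg c1, if_neg c2, if_neg c3, if_neg c4, if_pos c5]
    refine pv_find_eq_of _ _ 5 (by rw [c5]; decide) ?_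
    intro j hj hpre
    rw [pv_pre_take P _ hP] at hpre
    interval_cases j
    · exact c0 (hpre.trans (by decide))
    · exact c1 (hpre.trans (by decide))
    · exact c2 (hpre.trans (by decide))
    · exact c3 (hpre.trans (by decide))
    · exact c4 (hpre.trans (by decide))
  by_cases c6 : P = "BWBWBWWBWBWW".toList
  · rw [if_neg c0, if_neg c1, if_neg c2, if_neg c3, if_neg c4, if_neg c5, if_pos c6]
    refine pv_find_eq_of _ _ 6 (by rw [c6]; decide) ?_
    intro j hj hpre
    rw [pv_pre_take P _ hP] at hpre
    interval_cases j
    · exact c0 (hpre.trans (by decide))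
    · exact c1 (hpre.trans (by decide))
    · exact c2 (hpre.trans (by decide))
    · exact c3 (hpre.trans (by decide))
    · exact c4 (hpre.trans (by decide))
    · exact c5 (hpre.trans (by decide))
  by_cases c7 : P = "WBWBWWBWBWWB".toList
  · rw [if_neg c0, if_neg c1, if_neg c2, if_neg c3, if_neg c4, if_neg c5, if_neg c6, if_pos c7]
    refine pv_find_eq_of _ _ 7 (by rw [c7]; decide) ?_
    intro j hj hpre
    rw [pv_pre_take P _ hP] at hpre
    interval_cases j
    · exact c0 (hpre.trans (by decide))
    · exact c1 (hpre.trans (by decide))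
    · exact c2 (hpre.trans (by decide))
    · exact c3 (hpre.trans (by decide))
    · exact c4 (hpre.trans (by decide))
    · exact c5 (hpre.trans (by decide))
    · exact c6 (hpre.trans (by decide))
  by_cases c8 : P = "BWBWWBWBWWBW".toList
  · rw [if_neg c0, if_neg c1, if_neg c2, if_neg c3, if_neg c4, if_neg c5, if_neg c6, if_neg c7, if_pos c8]
    refine pv_find_eq_of _ _ 8 (by rw [c8]; decide) ?_
    intro j hj hpre
    rw [pv_pre_take P _ hP] at hpre
    interval_cases j
    · exact c0 (hpre.trans (by decide))
    · exact c1 (hpre.trans (by decide))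
    · exact c2 (hpre.trans (by decide))
    · exact c3 (hpre.trans (by decide))
    · exact c4 (hpre.trans (by decide))
    · exact c5 (hpre.trans (by decide))
    · exact c6 (hpre.trans (by decide))
    · exact c7 (hpre.trans (by decide))
  by_cases c9 : P = "WBWWBWBWWBWB".toList
  · rw [if_neg c0, if_neg c1, if_neg c2, if_neg c3, if_neg c4, if_neg c5, if_neg c6, if_neg c7, if_neg c8, if_pos c9]
    refine pv_find_eq_of _ _ 9 (by rw [c9]; decide) ?_
    intro j hj hpre
    rw [pv_pre_take P _ hP] at hpre
    interval_cases j
    · exact c0 (hpre.trans (by decide))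
    · exact c1 (hpre.trans (by decide))
    · exact c2 (hpre.trans (by decide))
    · exact c3 (hpre.trans (by decide))
    · exact c4 (hpre.trans (by decide))
    · exact c5 (hpre.trans (by decide))
    · exact c6 (hpre.trans (by decide))
    · exact c7 (hpre.trans (by decide))
    · exact c8 (hpre.trans (by decide))
  by_cases c10 : P = "BWWBWBWWBWBW".toList
  · rw [if_neg c0, if_neg c1, if_neg c2, if_neg c3, if_neg c4, if_neg c5, if_neg c6, if_neg c7, if_neg c8, if_neg c9, if_pos c10]
    refine pv_find_eq_of _ _ 10 (by rw [c10]; decide) ?_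
    intro j hj hpre
    rw [pv_pre_take P _ hP] at hpre
    interval_cases j
    · exact c0 (hpre.trans (by decide))
    · exact c1 (hpre.trans (by decide))
    · exact c2 (hpre.trans (by decide))
    · exact c3 (hpre.trans (by decide))
    · exact c4 (hpre.trans (by decide))
    · exact c5 (hpre.trans (by decide))
    · exact c6 (hpre.trans (by decide))
    · exact c7 (hpre.trans (by decide))
    · exact c8 (hpre.trans (by decide))
    · exact c9 (hpre.trans (by decide))
  by_cases c11 : P = "WWBWBWWBWBWB".toList
  · rw [if_neg c0, if_neg c1, if_neg c2, if_neg c3, if_neg c4, if_neg c5, if_neg c6, if_neg c7, if_neg c8, if_neg c9, if_neg c10, if_pos c11]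
    refine pv_find_eq_of _ _ 11 (by rw [c11]; decide) ?_
    intro j hj hpre
    rw [pv_pre_take P _ hP] at hpre
    interval_cases j
    · exact c0 (hpre.trans (by decide))
    · exact c1 (hpre.trans (by decide))
    · exact c2 (hpre.trans (by decide))
    · exact c3 (hpre.trans (by decide))
    · exact c4 (hpre.trans (by decide))
    · exact c5 (hpre.trans (by decide))
    · exact c6 (hpre.trans (by decide))
    · exact c7 (hpre.trans (by decide))
    · exact c8 (hpre.trans (by decide))
    · exact c9 (hpre.trans (by decide))
    · exact c10 (hpre.trans (by decide))
  rw [if_neg c0, if_neg c1, if_neg c2, if_neg c3, if_neg c4, if_neg c5, if_neg c6, if_neg c7, if_neg c8, if_neg c9, if_neg c10, if_neg c11]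
  rw [PySem.Chars.find_eq_neg_one_iff]
  intro hinf
  obtain ⟨j, hj⟩ := (PySem.Chars.exists_prefix_drop_iff_isIn P pvDoubledB).2
    ((PySem.Chars.isIn_iff_infix P pvDoubledB).mpr hinf)
  have hlen := hj.length_le
  rw [List.length_drop, hP] at hlen
  have h24 : pvDoubledB.length = 24 := by decide
  rw [h24] at hlen
  have hj12 : j ≤ 12 := by omega
  have hpre := (pv_pre_take P _ hP).1 hj
  interval_cases j
  · exact c0 (hpre.trans (by decide))
  · exact c1 (hpre.trans (by decide))
  · exact c2 (hpre.trans (by decide))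
  · exact c3 (hpre.trans (by decide))
  · exact c4 (hpre.trans (by decide))
  · exact c5 (hpre.trans (by decide))
  · exact c6 (hpre.trans (by decide))
  · exact c7 (hpre.trans (by decide))
  · exact c8 (hpre.trans (by decide))
  · exact c9 (hpre.trans (by decide))
  · exact c10 (hpre.trans (by decide))
  · exact c11 (hpre.trans (by decide))
  · exact c0 (hpre.trans (by decide))

set_option maxHeartbeats 4000000 in
theorem pv_main (S : String) : pianist_takahashi S = pianist_takahashi_alt S := by
  unfold pianist_takahashi pianist_takahashi_alt
  rw [show PySem.List.enumerate pvScales = [((0 : Int), "Do"), ((1 : Int), "Do#"), ((2 : Int), "Re"), ((3 : Int), "Re#"), ((4 : Int), "Mi"), ((5 : Int), "Fa"), ((6 : Int), "Fa#"), ((7 : Int), "So"), ((8 : Int), "So#"), ((9 : Int), "La"), ((10 : Int), "La#"), ((11 : Int), "Si")] from by decide]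
  rw [show PySem.List.slice S.toList none (some 12) = S.toList.take 12 from by
    rw [show ((12 : Int)) = ((12 : Nat) : Int) from rfl, PySem.List.slice_to_natCast]]
  simp only [pvALoop]
  rw [show (PySem.List.slice pvKeyboard (some (0 : Int)) none ++ PySem.List.slice pvKeyboard none (some (0 : Int))) = "WBWBWWBWBWBW".toList from by decide]
  rw [show (PySem.List.slice pvKeyboard (some (1 : Int)) none ++ PySem.List.slice pvKeyboard none (some (1 : Int))) = "BWBWWBWBWBWW".toList from by decide]
  rw [show (PySem.List.slice pvKeyboard (some (2 : Int)) none ++ PySem.List.slice pvKeyboard none (some (2 : Int))) = "WBWWBWBWBWWB".toList from by decide]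
  rw [show (PySem.List.slice pvKeyboard (some (3 : Int)) none ++ PySem.List.slice pvKeyboard none (some (3 : Int))) = "BWWBWBWBWWBW".toList from by decide]
  rw [show (PySem.List.slice pvKeyboard (some (4 : Int)) none ++ PySem.List.slice pvKeyboard none (some (4 : Int))) = "WWBWBWBWWBWB".toList from by decide]
  rw [show (PySem.List.slice pvKeyboard (some (5 : Int)) none ++ PySem.List.slice pvKeyboard none (some (5 : Int))) = "WBWBWBWWBWBW".toList from by decide]
  rw [show (PySem.List.slice pvKeyboard (some (6 : Int)) none ++ PySem.List.slice pvKeyboard none (some (6 : Int))) = "BWBWBWWBWBWW".toList from by decide]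
  rw [show (PySem.List.slice pvKeyboard (some (7 : Int)) none ++ PySem.List.slice pvKeyboard none (some (7 : Int))) = "WBWBWWBWBWWB".toList from by decide]
  rw [show (PySem.List.slice pvKeyboard (some (8 : Int)) none ++ PySem.List.slice pvKeyboard none (some (8 : Int))) = "BWBWWBWBWWBW".toList from by decide]
  rw [show (PySem.List.slice pvKeyboard (some (9 : Int)) none ++ PySem.List.slice pvKeyboard none (some (9 : Int))) = "WBWWBWBWWBWB".toList from by decide]
  rw [show (PySem.List.slice pvKeyboard (some (10 : Int)) none ++ PySem.List.slice pvKeyboard none (some (10 : Int))) = "BWWBWBWWBWBW".toList from by decide]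
  rw [show (PySem.List.slice pvKeyboard (some (11 : Int)) none ++ PySem.List.slice pvKeyboard none (some (11 : Int))) = "WWBWBWWBWBWB".toList from by decide]
  rw [pv_startswith_take S.toList "WBWBWWBWBWBW".toList (by decide)]
  rw [pv_startswith_take S.toList "BWBWWBWBWBWW".toList (by decide)]
  rw [pv_startswith_take S.toList "WBWWBWBWBWWB".toList (by decide)]
  rw [pv_startswith_take S.toList "BWWBWBWBWWBW".toList (by decide)]
  rw [pv_startswith_take S.toList "WWBWBWBWWBWB".toList (by decide)]
  rw [pv_startswith_take S.toList "WBWBWBWWBWBW".toList (by decide)]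
  rw [pv_startswith_take S.toList "BWBWBWWBWBWW".toList (by decide)]
  rw [pv_startswith_take S.toList "WBWBWWBWBWWB".toList (by decide)]
  rw [pv_startswith_take S.toList "BWBWWBWBWWBW".toList (by decide)]
  rw [pv_startswith_take S.toList "WBWWBWBWWBWB".toList (by decide)]
  rw [pv_startswith_take S.toList "BWWBWBWWBWBW".toList (by decide)]
  rw [pv_startswith_take S.toList "WWBWBWWBWBWB".toList (by decide)]
  rw [show PySem.Str.len S = (S.toList.length : Int) from by simp [PySem.Str.len_eq]]
  by_cases hlen : (12 : Int) ≤ (S.toList.length : Int)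
  · have hP : (S.toList.take 12).length = 12 := by rw [List.length_take]; omega
    rw [pv_find_char _ hP]
    by_cases c0 : S.toList.take 12 = "WBWBWWBWBWBW".toList
    · rw [if_pos (decide_eq_true c0), if_pos c0]
      rw [if_pos ⟨hlen, by norm_num, by norm_num⟩]
      decide
    by_cases c1 : S.toList.take 12 = "BWBWWBWBWBWW".toList
    · rw [if_neg (show ¬(decide (S.toList.take 12 = "WBWBWWBWBWBW".toList) = true) from by rw [decide_eq_true_eq]; exact c0), if_neg c0, if_pos (decide_eq_true c1), if_pos c1]
      rw [if_pos ⟨hlen, by norm_num, by norm_num⟩]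
      decide
    by_cases c2 : S.toList.take 12 = "WBWWBWBWBWWB".toList
    · rw [if_neg (show ¬(decide (S.toList.take 12 = "WBWBWWBWBWBW".toList) = true) from by rw [decide_eq_true_eq]; exact c0), if_neg c0, if_neg (show ¬(decide (S.toList.take 12 = "BWBWWBWBWBWW".toList) = true) from by rw [decide_eq_true_eq]; exact c1), if_neg c1, if_pos (decide_eq_true c2), if_pos c2]
      rw [if_pos ⟨hlen, by norm_num, by norm_num⟩]
      decide
    by_cases c3 : S.toList.take 12 = "BWWBWBWBWWBW".toList
    · rw [if_neg (show ¬(decide (S.toList.take 12 = "WBWBWWBWBWBW".toList) = true) from by rw [decide_eq_true_eq]; exact c0), if_neg c0, if_neg (show ¬(decide (S.toList.take 12 = "BWBWWBWBWBWW".toList) = true) from by rw [decide_eq_true_eq]; exact c1), if_neg c1, if_neg (show ¬(decide (S.toList.take 12 = "WBWWBWBWBWWB".toList) = true) from by rw [decide_eq_true_eq]; exact c2), if_neg c2, if_pos (decide_eq_true c3), if_pos c3]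
      rw [if_pos ⟨hlen, by norm_num, by norm_num⟩]
      decide
    by_cases c4 : S.toList.take 12 = "WWBWBWBWWBWB".toList
    · rw [if_neg (show ¬(decide (S.toList.take 12 = "WBWBWWBWBWBW".toList) = true) from by rw [decide_eq_true_eq]; exact c0), if_neg c0, if_neg (show ¬(decide (S.toList.take 12 = "BWBWWBWBWBWW".toList) = true) from by rw [decide_eq_true_eq]; exact c1), if_neg c1, if_neg (show ¬(decide (S.toList.take 12 = "WBWWBWBWBWWB".toList) = true) from by rw [decide_eq_true_eq]; exact c2), if_neg c2, if_neg (show ¬(decide (S.toList.take 12 = "BWWBWBWBWWBW".toList) = true) from by rw [decide_eq_true_eq]; exact c3), if_neg c3, if_pos (decide_eq_true c4), if_pos c4]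
      rw [if_pos ⟨hlen, by norm_num, by norm_num⟩]
      decide
    by_cases c5 : S.toList.take 12 = "WBWBWBWWBWBW".toList
    · rw [if_neg (show ¬(decide (S.toList.take 12 = "WBWBWWBWBWBW".toList) = true) from by rw [decide_eq_true_eq]; exact c0), if_neg c0, if_neg (show ¬(decide (S.toList.take 12 = "BWBWWBWBWBWW".toList) = true) from by rw [decide_eq_true_eq]; exact c1), if_neg c1, if_neg (show ¬(decide (S.toList.take 12 = "WBWWBWBWBWWB".toList) = true) from by rw [decide_eq_true_eq]; exact c2), if_neg c2, if_neg (show ¬(decide (S.toList.take 12 = "BWWBWBWBWWBW".toList) = true) from by rw [decide_eq_true_eq]; exact c3), if_neg c3, if_neg (show ¬(decide (S.toList.take 12 = "WWBWBWBWWBWB".toList) = true) from by rw [decide_eq_true_eq]; exact c4), if_neg c4, if_pos (decide_eq_true c5), if_pos c5]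
      rw [if_pos ⟨hlen, by norm_num, by norm_num⟩]
      decide
    by_cases c6 : S.toList.take 12 = "BWBWBWWBWBWW".toList
    · rw [if_neg (show ¬(decide (S.toList.take 12 = "WBWBWWBWBWBW".toList) = true) from by rw [decide_eq_true_eq]; exact c0), if_neg c0, if_neg (show ¬(decide (S.toList.take 12 = "BWBWWBWBWBWW".toList) = true) from by rw [decide_eq_true_eq]; exact c1), if_neg c1, if_neg (show ¬(decide (S.toList.take 12 = "WBWWBWBWBWWB".toList) = true) from by rw [decide_eq_true_eq]; exact c2), if_neg c2, if_neg (show ¬(decide (S.toList.take 12 = "BWWBWBWBWWBW".toList) = true) from by rw [decide_eq_true_eq]; exact c3), if_neg c3, if_neg (show ¬(decide (S.toList.take 12 = "WWBWBWBWWBWB".toList) = true) from by rw [decide_eq_true_eq]; exact c4), if_neg c4, if_neg (show ¬(decide (S.toList.take 12 = "WBWBWBWWBWBW".toList) = true) from by rw [decide_eq_true_eq]; exact c5), if_neg c5, if_pos (decide_eq_true c6), if_pos c6]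
      rw [if_pos ⟨hlen, by norm_num, by norm_num⟩]
      decide
    by_cases c7 : S.toList.take 12 = "WBWBWWBWBWWB".toList
    · rw [if_neg (show ¬(decide (S.toList.take 12 = "WBWBWWBWBWBW".toList) = true) from by rw [decide_eq_true_eq]; exact c0), if_neg c0, if_neg (show ¬(decide (S.toList.take 12 = "BWBWWBWBWBWW".toList) = true) from by rw [decide_eq_true_eq]; exact c1), if_neg c1, if_neg (show ¬(decide (S.toList.take 12 = "WBWWBWBWBWWB".toList) = true) from by rw [decide_eq_true_eq]; exact c2), if_neg c2, if_neg (show ¬(decide (S.toList.take 12 = "BWWBWBWBWWBW".toList) = true) from by rw [decide_eq_true_eq]; exact c3), if_neg c3, if_neg (show ¬(decide (S.toList.take 12 = "WWBWBWBWWBWB".toList) = true) from by rw [decide_eq_true_eq]; exact c4), if_neg c4, if_neg (show ¬(decide (S.toList.take 12 = "WBWBWBWWBWBW".toList) = true) from by rw [decide_eq_true_eq]; exact c5), if_neg c5, if_neg (show ¬(decide (S.toList.take 12 = "BWBWBWWBWBWW".toList) = true) from by rw [decide_eq_true_eq]; exact c6), if_neg c6, if_pos (decide_eq_true c7), if_pos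 c7]
      rw [if_pos ⟨hlen, by norm_num, by norm_num⟩]
      decide
    by_cases c8 : S.toList.take 12 = "BWBWWBWBWWBW".toList
    · rw [if_neg (show ¬(decide (S.toList.take 12 = "WBWBWWBWBWBW".toList) = true) from by rw [decide_eq_true_eq]; exact c0), if_neg c0, if_neg (show ¬(decide (S.toList.take 12 = "BWBWWBWBWBWW".toList) = true) from by rw [decide_eq_true_eq]; exact c1), if_neg c1, if_neg (show ¬(decide (S.toList.take 12 = "WBWWBWBWBWWB".toList) = true) from by rw [decide_eq_true_eq]; exact c2), if_neg c2, if_neg (show ¬(decide (S.toList.take 12 = "BWWBWBWBWWBW".toList) = true) from by rw [decide_eq_true_eq]; exact c3), if_neg c3, if_neg (show ¬(decide (S.toList.take 12 = "WWBWBWBWWBWB".toList) = true) from by rw [decide_eq_true_eq]; exact c4), if_neg c4, if_neg (show ¬(decide (S.toList.take 12 = "WBWBWBWWBWBW".toList) = true) from by rw [decide_eq_true_eq]; exact c5), if_neg c5, if_neg (show ¬(decide (S.toList.take 12 = "BWBWBWWBWBWW".toList) = true) from by rw [decide_eq_true_eq]; exact c6), if_neg c6, if_neg (show ¬(decide (S.toList.take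 12 = "WBWBWWBWBWWB".toList) = true) from by rw [decide_eq_true_eq]; exact c7), if_neg c7, if_pos (decide_eq_true c8), if_pos c8]
      rw [if_pos ⟨hlen, by norm_num, by norm_num⟩]
      decide
    by_cases c9 : S.toList.take 12 = "WBWWBWBWWBWB".toList
    · rw [if_neg (show ¬(decide (S.toList.take 12 = "WBWBWWBWBWBW".toList) = true) from by rw [decide_eq_true_eq]; exact c0), if_neg c0, if_neg (show ¬(decide (S.toList.take 12 = "BWBWWBWBWBWW".toList) = true) from by rw [decide_eq_true_eq]; exact c1), if_neg c1, if_neg (show ¬(decide (S.toList.take 12 = "WBWWBWBWBWWB".toList) = true) from by rw [decide_eq_true_eq]; exact c2), if_neg c2, if_neg (show ¬(decide (S.toList.take 12 = "BWWBWBWBWWBW".toList) = true) from by rw [decide_eq_true_eq]; exact c3), if_neg c3, if_neg (show ¬(decide (S.toList.take 12 = "WWBWBWBWWBWB".toList) = true) from by rw [decide_eq_true_eq]; exact c4), if_neg c4, if_neg (show ¬(decide (S.toList.take 12 = "WBWBWBWWBWBW".toList) = true) from by rw [decide_eq_true_eq]; exact c5), if_neg c5, if_neg (show ¬(decide (S.toList.take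 12 = "BWBWBWWBWBWW".toList) = true) from by rw [decide_eq_true_eq]; exact c6), if_neg c6, if_neg (show ¬(decide (S.toList.take 12 = "WBWBWWBWBWWB".toList) = true) from by rw [decide_eq_true_eq]; exact c7), if_neg c7, if_neg (show ¬(decide (S.toList.take 12 = "BWBWWBWBWWBW".toList) = true) from by rw [decide_eq_true_eq]; exact c8), if_neg c8, if_pos (decide_eq_true c9), if_pos c9]
      rw [if_pos ⟨hlen, by norm_num, by norm_num⟩]
      decide
    by_cases c10 : S.toList.take 12 = "BWWBWBWWBWBW".toList
    · rw [if_neg (show ¬(decide (S.toList.take 12 = "WBWBWWBWBWBW".toList) = true) from by rw [decide_eq_true_eq]; exact c0), if_neg c0, if_neg (show ¬(decide (S.toList.take 12 = "BWBWWBWBWBWW".toList) = true) from by rw [decide_eq_true_eq]; exact c1), if_neg c1, if_neg (show ¬(decide (S.toList.take 12 = "WBWWBWBWBWWB".toList) = true) from by rw [decide_eq_true_eq]; exact c2), if_neg c2, if_neg (show ¬(decide (S.toList.take 12 = "BWWBWBWBWWBW".toList) = true) from by rw [decide_eq_true_eq]; exact c3), if_neg c3, if_neg (show ¬(decide (S.toList.take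 12 = "WWBWBWBWWBWB".toList) = true) from by rw [decide_eq_true_eq]; exact c4), if_neg c4, if_neg (show ¬(decide (S.toList.take 12 = "WBWBWBWWBWBW".toList) = true) from by rw [decide_eq_true_eq]; exact c5), if_neg c5, if_neg (show ¬(decide (S.toList.take 12 = "BWBWBWWBWBWW".toList) = true) from by rw [decide_eq_true_eq]; exact c6), if_neg c6, if_neg (show ¬(decide (S.toList.take 12 = "WBWBWWBWBWWB".toList) = true) from by rw [decide_eq_true_eq]; exact c7), if_neg c7, if_neg (show ¬(decide (S.toList.take 12 = "BWBWWBWBWWBW".toList) = true) from by rw [decide_eq_true_eq]; exact c8), if_neg c8, if_neg (show ¬(decide (S.toList.take 12 = "WBWWBWBWWBWB".toList) = true) from by rw [decide_eq_true_eq]; exact c9), if_neg c9, if_pos (decide_eq_true c10), if_pos c10]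
      rw [if_pos ⟨hlen, by norm_num, by norm_num⟩]
      decide
    by_cases c11 : S.toList.take 12 = "WWBWBWWBWBWB".toList
    · rw [if_neg (show ¬(decide (S.toList.take 12 = "WBWBWWBWBWBW".toList) = true) from by rw [decide_eq_true_eq]; exact c0), if_neg c0, if_neg (show ¬(decide (S.toList.take 12 = "BWBWWBWBWBWW".toList) = true) from by rw [decide_eq_true_eq]; exact c1), if_neg c1, if_neg (show ¬(decide (S.toList.take 12 = "WBWWBWBWBWWB".toList) = true) from by rw [decide_eq_true_eq]; exact c2), if_neg c2, if_neg (show ¬(decide (S.toList.take 12 = "BWWBWBWBWWBW".toList) = true) from by rw [decide_eq_true_eq]; exact c3), if_neg c3, if_neg (show ¬(decide (S.toList.take 12 = "WWBWBWBWWBWB".toList) = true) from by rw [decide_eq_true_eq]; exact c4), if_neg c4, if_neg (show ¬(decide (S.toList.take 12 = "WBWBWBWWBWBW".toList) = true) from by rw [decide_eq_true_eq]; exact c5), if_neg c5, if_neg (show ¬(decide (S.toList.take 12 = "BWBWBWWBWBWW".toList) = true) from by rw [decide_eq_true_eq]; exact c6), if_neg c6, if_neg (show ¬(decide (S.toList.take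 12 = "WBWBWWBWBWWB".toList) = true) from by rw [decide_eq_true_eq]; exact c7), if_neg c7, if_neg (show ¬(decide (S.toList.take 12 = "BWBWWBWBWWBW".toList) = true) from by rw [decide_eq_true_eq]; exact c8), if_neg c8, if_neg (show ¬(decide (S.toList.take 12 = "WBWWBWBWWBWB".toList) = true) from by rw [decide_eq_true_eq]; exact c9), if_neg c9, if_neg (show ¬(decide (S.toList.take 12 = "BWWBWBWWBWBW".toList) = true) from by rw [decide_eq_true_eq]; exact c10), if_neg c10, if_pos (decide_eq_true c11), if_pos c11]
      rw [if_pos ⟨hlen, by norm_num, by norm_num⟩]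
      decide
    rw [if_neg (show ¬(decide (S.toList.take 12 = "WBWBWWBWBWBW".toList) = true) from by rw [decide_eq_true_eq]; exact c0), if_neg c0, if_neg (show ¬(decide (S.toList.take 12 = "BWBWWBWBWBWW".toList) = true) from by rw [decide_eq_true_eq]; exact c1), if_neg c1, if_neg (show ¬(decide (S.toList.take 12 = "WBWWBWBWBWWB".toList) = true) from by rw [decide_eq_true_eq]; exact c2), if_neg c2, if_neg (show ¬(decide (S.toList.take 12 = "BWWBWBWBWWBW".toList) = true) from by rw [decide_eq_true_eq]; exact c3), if_neg c3, if_neg (show ¬(decide (S.toList.take 12 = "WWBWBWBWWBWB".toList) = true) from by rw [decide_eq_true_eq]; exact c4), if_neg c4, if_neg (show ¬(decide (S.toList.take 12 = "WBWBWBWWBWBW".toList) = true) from by rw [decide_eq_true_eq]; exact c5), if_neg c5, if_neg (show ¬(decide (S.toList.take 12 = "BWBWBWWBWBWW".toList) = true) from by rw [decide_eq_true_eq]; exact c6), if_neg c6, if_neg (show ¬(decide (S.toList.take 12 = "WBWBWWBWBWWB".toList) = true) from by rw [decide_eq_true_eq]; exact c7), if_neg c7, if_neg (show ¬(decide (S.toList.take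 12 = "BWBWWBWBWWBW".toList) = true) from by rw [decide_eq_true_eq]; exact c8), if_neg c8, if_neg (show ¬(decide (S.toList.take 12 = "WBWWBWBWWBWB".toList) = true) from by rw [decide_eq_true_eq]; exact c9), if_neg c9, if_neg (show ¬(decide (S.toList.take 12 = "BWWBWBWWBWBW".toList) = true) from by rw [decide_eq_true_eq]; exact c10), if_neg c10, if_neg (show ¬(decide (S.toList.take 12 = "WWBWBWWBWBWB".toList) = true) from by rw [decide_eq_true_eq]; exact c11), if_neg c11]
    rw [if_neg (fun h => absurd h.2.1 (by norm_num))]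
  · have hlt : S.toList.length < 12 := by omega
    have hP : (S.toList.take 12).length < 12 := by rw [List.length_take]; omega
    rw [if_neg (show ¬(decide (S.toList.take 12 = "WBWBWWBWBWBW".toList) = true) from by rw [decide_eq_true_eq]; exact pv_ne_of_len hP (show ("WBWBWWBWBWBW".toList).length = 12 from by decide)), if_neg (show ¬(decide (S.toList.take 12 = "BWBWWBWBWBWW".toList) = true) from by rw [decide_eq_true_eq]; exact pv_ne_of_len hP (show ("BWBWWBWBWBWW".toList).length = 12 from by decide)), if_neg (show ¬(decide (S.toList.take 12 = "WBWWBWBWBWWB".toList) = true) from by rw [decide_eq_true_eq]; exact pv_ne_of_len hP (show ("WBWWBWBWBWWB".toList).length = 12 from by decide)), if_neg (show ¬(decide (S.toList.take 12 = "BWWBWBWBWWBW".toList) = true) from by rw [decide_eq_true_eq]; exact pv_ne_of_len hP (show ("BWWBWBWBWWBW".toList).length = 12 from by decide)), if_neg (show ¬(decide (S.toList.take 12 = "WWBWBWBWWBWB".toList) = true) from by rw [decide_eq_true_eq]; exact pv_ne_of_len hP (show ("WWBWBWBWWBWB".toList).length = 12 from by decide)), if_neg (show ¬(decide (S.toList.take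 12 = "WBWBWBWWBWBW".toList) = true) from by rw [decide_eq_true_eq]; exact pv_ne_of_len hP (show ("WBWBWBWWBWBW".toList).length = 12 from by decide)), if_neg (show ¬(decide (S.toList.take 12 = "BWBWBWWBWBWW".toList) = true) from by rw [decide_eq_true_eq]; exact pv_ne_of_len hP (show ("BWBWBWWBWBWW".toList).length = 12 from by decide)), if_neg (show ¬(decide (S.toList.take 12 = "WBWBWWBWBWWB".toList) = true) from by rw [decide_eq_true_eq]; exact pv_ne_of_len hP (show ("WBWBWWBWBWWB".toList).length = 12 from by decide)), if_neg (show ¬(decide (S.toList.take 12 = "BWBWWBWBWWBW".toList) = true) from by rw [decide_eq_true_eq]; exact pv_ne_of_len hP (show ("BWBWWBWBWWBW".toList).length = 12 from by decide)), if_neg (show ¬(decide (S.toList.take 12 = "WBWWBWBWWBWB".toList) = true) from by rw [decide_eq_true_eq]; exact pv_ne_of_len hP (show ("WBWWBWBWWBWB".toList).length = 12 from by decide)), if_neg (show ¬(decide (S.toList.take 12 = "BWWBWBWWBWBW".toList) = true) from by rw [decide_eq_true_eq]; exact pv_ne_of_len hP (show ("BWWBWBWWBWBW".toList).length = 12 from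 by decide)), if_neg (show ¬(decide (S.toList.take 12 = "WWBWBWWBWBWB".toList) = true) from by rw [decide_eq_true_eq]; exact pv_ne_of_len hP (show ("WWBWBWWBWBWB".toList).length = 12 from by decide))]
    rw [if_neg (fun h => absurd h.1 hlen)]

-- ===== VERDICT =====
theorem pianist_takahashi_spec : Claim_equal_pianist_takahashi := by
  unfold Claim_equal_pianist_takahashi Spec_pianist_takahashi
  intro S _
  exact pv_main S
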